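-- pv_equiv track=rewrite | github.com/Sardor013/11---dars | 11 - dars/8 - misol.py | antiqa_sonmi
-- ===== SOURCE A (Python) =====
-- def antiqa_sonmi(n):
--     n_str = str(n)
--     valid_digits = {'0', '1', '8'}
--     for i in n_str:
--         if i not in valid_digits:
--             return "NO"
--     if n_str != n_str[::-1]:
--         return "NO"
--     return "YES"
-- ===== SOURCE B (Python) =====
-- def antiqa_sonmi(n):
--     s = str(n)
--     i, j = 0, len(s) - 1
--     while i <= j:
--         if s[i] not in ('0', '1', '8') or s[j] not in ('0', '1', '8') or s[i] != s[j]: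
--             return "NO"
--         i += 1
--         j -= 1
--     return "YES"
-- ===== Notes on version B (the rewrite author's own statement) =====
-- stated objective: alternative
-- what changed: Replaced A's two sequential scans (validity check over all digits, then whole-string palindrome comparison against a reversed copy) by a single two-pointer loop that checks digit validity of both ends and their equality in one combined pass, without building a reversed string.
import Mathlib
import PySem

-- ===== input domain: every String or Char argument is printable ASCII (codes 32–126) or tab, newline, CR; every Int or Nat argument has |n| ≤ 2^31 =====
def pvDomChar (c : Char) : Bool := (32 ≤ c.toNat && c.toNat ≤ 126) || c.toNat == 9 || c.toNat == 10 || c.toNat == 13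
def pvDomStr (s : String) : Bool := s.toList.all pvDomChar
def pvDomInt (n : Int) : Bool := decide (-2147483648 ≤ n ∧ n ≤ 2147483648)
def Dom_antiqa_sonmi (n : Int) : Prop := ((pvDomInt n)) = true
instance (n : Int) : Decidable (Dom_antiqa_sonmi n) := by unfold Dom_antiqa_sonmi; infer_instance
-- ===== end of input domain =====

-- B replaces A's two sequential scans (digit-validity loop, then palindrome comparison
-- against a reversed copy) by a single two-pointer pass; alternative decomposition, same cost.


-- ===== PORT A =====
-- the 'for i in n_str: if i not in valid_digits: return "NO"' loop
def pvValidLoopA : List Char → Option String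
  | [] => none
  | c :: rest => if c = '0' ∨ c = '1' ∨ c = '8' then pvValidLoopA rest else some "NO"

def antiqa_sonmi (n : Int) : String :=
  match pvValidLoopA (PySem.Int.toStr n).toList with
  | some r => r
  | none =>
    -- n_str != n_str[::-1]
    if some (PySem.Int.toStr n) ≠ PySem.Str.slice? (PySem.Int.toStr n) none none (-1)
    then "NO" else "YES"

-- ===== PORT B =====
-- the 'while i <= j' two-pointer loop of Source B; s[i]/s[j] are in range whenever read, so getD is exact
def pvTwoPtr (cs : List Char) (i j : Nat) : String :=
  if i ≤ j then
    if ¬(cs.getD i ' ' = '0' ∨ cs.getD i ' ' = '1' ∨ cs.getD i ' ' = '8') ∨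
       ¬(cs.getD j ' ' = '0' ∨ cs.getD j ' ' = '1' ∨ cs.getD j ' ' = '8') ∨
       cs.getD i ' ' ≠ cs.getD j ' ' then
      "NO"
    else
      pvTwoPtr cs (i + 1) (j - 1)
  else "YES"
termination_by j + 1 - i
decreasing_by omega

def antiqa_sonmi_alt (n : Int) : String :=
  pvTwoPtr (PySem.Int.toStr n).toList 0 ((PySem.Int.toStr n).toList.length - 1)

-- ===== PRECONDITION & SPEC =====
def Spec_antiqa_sonmi (n : Int) (out : String) : Prop := out = antiqa_sonmi_alt n
instance (n : Int) (out : String) : Decidable (Spec_antiqa_sonmi n out) := by unfold Spec_antiqa_sonmi; infer_instance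

-- ===== CLAIM (what is proved, stated in full; the proofs are below) =====
def Claim_equal_antiqa_sonmi : Prop := ∀ (n : Int), Dom_antiqa_sonmi n → Spec_antiqa_sonmi n (antiqa_sonmi n)

-- ===== LEMMAS AND PROOFS =====

def pvValid (c : Char) : Bool := c = '0' || c = '1' || c = '8'

lemma pvValid_iff (c : Char) : pvValid c = true ↔ (c = '0' ∨ c = '1' ∨ c = '8') := by
  unfold pvValid; simp [or_assoc]

lemma pvValidLoopA_eq (cs : List Char) :
    pvValidLoopA cs = if cs.all pvValid then none else some "NO" := by
  induction cs with
  | nil => simp [pvValidLoopA]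
  | cons c rest ih =>
    by_cases h : c = '0' ∨ c = '1' ∨ c = '8'
    · have hv : pvValid c = true := (pvValid_iff c).mpr h
      simp [pvValidLoopA, if_pos h, ih, hv]
    · have hv : pvValid c = false := by
        rcases Bool.eq_false_or_eq_true (pvValid c) with h1 | h1
        · exact absurd ((pvValid_iff c).mp h1) h
        · exact h1
      simp [pvValidLoopA, if_neg h, hv]

lemma pvTwoPtr_yes (cs : List Char) (m i j : Nat) (hm : j + 1 - i ≤ m) :
    pvTwoPtr cs i j = "YES" ↔
      ∀ k, i ≤ k → k ≤ j →
        pvValid (cs.getD k ' ') = true ∧ cs.getD k ' ' = cs.getD (i + j - k) ' ' := by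
  induction m generalizing i j with
  | zero =>
    rw [pvTwoPtr, if_neg (by omega : ¬ i ≤ j)]
    constructor
    · intro _ k hk1 hk2; omega
    · intro _; trivial
  | succ m ih =>
    by_cases hij : i ≤ j
    · rw [pvTwoPtr, if_pos hij]
      by_cases hcond : ¬(cs.getD i ' ' = '0' ∨ cs.getD i ' ' = '1' ∨ cs.getD i ' ' = '8') ∨
          ¬(cs.getD j ' ' = '0' ∨ cs.getD j ' ' = '1' ∨ cs.getD j ' ' = '8') ∨
          cs.getD i ' ' ≠ cs.getD j ' '
      · rw [if_pos hcond]
        constructor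
        · intro h; exact absurd h (by decide)
        · intro h
          exfalso
          rcases hcond with h1 | h1 | h1
          · exact h1 ((pvValid_iff _).mp (h i le_rfl hij).1)
          · exact h1 ((pvValid_iff _).mp (h j hij le_rfl).1)
          · have := (h i le_rfl hij).2
            rw [show i + j - i = j from by omega] at this
            exact h1 this
      · rw [if_neg hcond]
        push Not at hcond
        obtain ⟨hvi, hvj, hije⟩ := hcond
        rw [ih (i + 1) (j - 1) (by omega)]
        constructor
        · intro h k hk1 hk2
          by_cases hki : k = i
          · subst hki
            refine ⟨(pvValid_iff _).mpr hvi, ?_⟩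
            rw [show k + j - k = j from by omega]; exact hije
          · by_cases hkj : k = j
            · subst hkj
              refine ⟨(pvValid_iff _).mpr hvj, ?_⟩
              rw [show i + k - k = i from by omega]; exact hije.symm
            · obtain ⟨hv, he⟩ := h k (by omega) (by omega)
              refine ⟨hv, ?_⟩
              rw [show i + j - k = i + 1 + (j - 1) - k from by omega]
              exact he
        · intro h k hk1 hk2
          obtain ⟨hv, he⟩ := h k (by omega) (by omega)
          refine ⟨hv, ?_⟩
          rw [show i + 1 + (j - 1) - k = i + j - k from by omega]
          exact he
    · rw [pvTwoPtr, if_neg hij]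
      constructor
      · intro _ k hk1 hk2; omega
      · intro _; trivial

lemma pvTwoPtr_cases (cs : List Char) (i j : Nat) :
    pvTwoPtr cs i j = "YES" ∨ pvTwoPtr cs i j = "NO" := by
  fun_induction pvTwoPtr cs i j <;> simp_all

-- both programs are characterized by the same predicate: all digits valid and palindrome
lemma pvTwoPtr_full (cs : List Char) (hne : cs ≠ []) :
    pvTwoPtr cs 0 (cs.length - 1) = "YES" ↔
      (cs.all pvValid = true ∧ cs = cs.reverse) := by
  have hlen : 0 < cs.length := List.length_pos_iff.mpr hne
  rw [pvTwoPtr_yes cs (cs.length - 1 + 1 - 0) 0 (cs.length - 1) le_rfl]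
  constructor
  · intro h
    constructor
    · rw [List.all_eq_true]
      intro c hc
      obtain ⟨k, hk, hget⟩ := List.getElem_of_mem hc
      have := (h k (by omega) (by omega)).1
      rwa [List.getD_eq_getElem cs ' ' hk, hget] at this
    · apply List.ext_getElem (by simp)
      intro k hk hk'
      have := (h k (by omega) (by omega)).2
      rw [List.getD_eq_getElem cs ' ' hk,
          List.getD_eq_getElem cs ' ' (by omega : 0 + (cs.length - 1) - k < cs.length)] at this
      rw [List.getElem_reverse, this]
      congr 1
      omega
  · rintro ⟨hall, hpal⟩ k hk0 hk1
    have hk : k < cs.length := by omega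
    constructor
    · rw [List.getD_eq_getElem cs ' ' hk]
      exact (List.all_eq_true.mp hall) _ (List.getElem_mem hk)
    · rw [List.getD_eq_getElem cs ' ' hk,
          List.getD_eq_getElem cs ' ' (by omega : 0 + (cs.length - 1) - k < cs.length)]
      have h1 : cs[k] = (cs.reverse)[k]'(by simpa using hk) := List.getElem_of_eq hpal hk
      rw [List.getElem_reverse] at h1
      rw [h1]
      congr 1
      omega

lemma toChars_ne_nil (n : Int) : PySem.Int.toChars n ≠ [] := by
  unfold PySem.Int.toChars
  split
  · simp
  · intro h
    have := Nat.length_toDigits_pos (b := 10) (n := n.toNat)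
    simp [h] at this

lemma antiqa_sonmi_eq (n : Int) :
    antiqa_sonmi n =
      if (PySem.Int.toStr n).toList.all pvValid = true ∧
         (PySem.Int.toStr n).toList = (PySem.Int.toStr n).toList.reverse
      then "YES" else "NO" := by
  unfold antiqa_sonmi
  rw [pvValidLoopA_eq, PySem.Str.slice?_none_none_neg_one]
  by_cases hall : (PySem.Int.toStr n).toList.all pvValid = true
  · rw [if_pos hall]
    show (if some (PySem.Int.toStr n)
             ≠ some (String.ofList (PySem.Int.toStr n).toList.reverse) then "NO" else "YES") = _
    by_cases hpal : (PySem.Int.toStr n).toList = (PySem.Int.toStr n).toList.reverse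
    · have heq : some (PySem.Int.toStr n)
          = some (String.ofList (PySem.Int.toStr n).toList.reverse) := by
        rw [← hpal, String.ofList_toList]
      rw [if_neg (fun hne => hne heq), if_pos ⟨hall, hpal⟩]
    · have hne : some (PySem.Int.toStr n)
          ≠ some (String.ofList (PySem.Int.toStr n).toList.reverse) := by
        intro h
        apply hpal
        have := congrArg (fun o : Option String => (o.getD "").toList) h
        simpa [String.toList_ofList] using this
      rw [if_pos hne, if_neg (fun hc => hpal hc.2)]
  · rw [if_neg hall]
    show "NO" = _
    rw [if_neg (fun hc => hall hc.1)]

-- ===== VERDICT (by name: the statement is the Claim_ definition above) =====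
theorem antiqa_sonmi_spec : Claim_equal_antiqa_sonmi := by
  intro n _
  unfold Spec_antiqa_sonmi antiqa_sonmi_alt
  rw [antiqa_sonmi_eq]
  have hne : (PySem.Int.toStr n).toList ≠ [] := by
    rw [PySem.Int.toList_toStr]; exact toChars_ne_nil n
  rcases pvTwoPtr_cases (PySem.Int.toStr n).toList 0 ((PySem.Int.toStr n).toList.length - 1) with h | h
  · rw [h, if_pos ((pvTwoPtr_full _ hne).mp h)]
  · rw [h, if_neg]
    intro hP
    have := (pvTwoPtr_full _ hne).mpr hP
    rw [h] at this
    exact absurd this (by decide)
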